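-- pv_equiv track=rewrite | github.com/asdf-format/asdf-schema-helpers | src/pytest_asdf_schema/common.py | id_to_schema
-- ===== SOURCE A (Python) =====
-- def id_to_schema(schemas):
--     result = {}
--     for schema in schemas:
--         if "id" in schema:
--             if schema["id"] not in result:
--                 result[schema["id"]] = []
--             result[schema["id"]].append(schema)
--     return result
-- ===== SOURCE B (Python) =====
-- def id_to_schema(schemas):
--     # two-phase: collect distinct ids in first-occurrence order, then rescan per id
--     ids = list(dict.fromkeys(s["id"] for s in schemas if "id" in s))
--     return {i: [s for s in schemas if "id" in s and s["id"] == i] for i in ids}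
-- ===== Notes on version B (the rewrite author's own statement) =====
-- stated objective: simpler
-- what changed: Replaced the single-pass incremental dict construction with a two-phase collect-then-rescan: one dedup pass over the ids, then for each id a comprehension filtering the schema list.
import Mathlib
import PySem

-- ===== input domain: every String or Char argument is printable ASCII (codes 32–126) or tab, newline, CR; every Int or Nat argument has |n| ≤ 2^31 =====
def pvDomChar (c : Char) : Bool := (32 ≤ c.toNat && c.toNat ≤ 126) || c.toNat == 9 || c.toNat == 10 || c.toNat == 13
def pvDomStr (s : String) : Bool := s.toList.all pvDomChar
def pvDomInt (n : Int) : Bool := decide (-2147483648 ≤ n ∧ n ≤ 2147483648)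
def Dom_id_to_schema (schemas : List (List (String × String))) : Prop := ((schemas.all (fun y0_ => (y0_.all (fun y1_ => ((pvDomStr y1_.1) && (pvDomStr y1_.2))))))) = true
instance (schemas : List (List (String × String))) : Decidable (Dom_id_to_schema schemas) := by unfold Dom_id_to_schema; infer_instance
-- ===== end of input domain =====

-- B groups schemas by id with a two-phase collect-then-rescan instead of A's one-pass dict build; objective: simpler.

-- ===== PORT A =====
def id_to_schema (schemas : List (List (String × String))) : List (String × List (List (String × String))) :=
  (schemas.foldl (fun result schema =>
    match (PySem.Dict.mk schema).get? "id" with      -- "id" in schema / schema["id"]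
    | none => result
    | some i =>
        ((if result.contains i then result else result.insert i []).modify i []
          (fun l => l ++ [schema]))                   -- result[id].append(schema)
  ) PySem.Dict.empty).items

-- ===== PORT B =====
def id_to_schema_alt (schemas : List (List (String × String))) : List (String × List (List (String × String))) :=
  let ids := PySem.List.dedup (schemas.filterMap (fun s => (PySem.Dict.mk s).get? "id"))
  ids.map (fun i => (i, schemas.filter (fun s => (PySem.Dict.mk s).get? "id" == some i)))

-- ===== PRECONDITION & SPEC =====
def Spec_id_to_schema (schemas : List (List (String × String))) (out : List (String × List (List (String × String)))) : Prop := out = id_to_schema_alt schemas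
instance (schemas : List (List (String × String))) (out : List (String × List (List (String × String)))) : Decidable (Spec_id_to_schema schemas out) := by unfold Spec_id_to_schema; infer_instance

-- ===== CLAIM (what is proved, stated in full; the proofs are below) =====
def Claim_equal_id_to_schema : Prop := ∀ (schemas : List (List (String × String))), Dom_id_to_schema schemas → Spec_id_to_schema schemas (id_to_schema schemas)

-- ===== LEMMAS AND PROOFS =====

-- A's loop body (setdefault-[]-then-append) is one modify
theorem aStep_eq (d : PySem.Dict String (List (List (String × String)))) (i : String)
    (s : List (String × String)) :
    (if d.contains i then d else d.insert i []).modify i [] (fun l => l ++ [s])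
      = d.modify i [] (fun l => l ++ [s]) := by
  by_cases h : d.contains i
  · simp [h]
  · have h' : d.contains i = false := by simpa using h
    simp only [h']
    simp [PySem.Dict.modify, PySem.Dict.insert_insert_self, PySem.Dict.getD_insert_self,
      PySem.Dict.getD_of_not_contains, h']

-- the (id, schema) pairs A actually processes
def pvPairs (schemas : List (List (String × String))) : List (String × List (String × String)) :=
  schemas.filterMap (fun s => ((PySem.Dict.mk s).get? "id").map (fun i => (i, s)))

-- A's fold over schemas is the modify-fold over pvPairs
theorem foldA_eq (schemas : List (List (String × String)))
    (d : PySem.Dict String (List (List (String × String)))) :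
    schemas.foldl (fun result schema =>
      match (PySem.Dict.mk schema).get? "id" with
      | none => result
      | some i =>
          ((if result.contains i then result else result.insert i []).modify i []
            (fun l => l ++ [schema]))) d
    = (pvPairs schemas).foldl (fun d p => d.modify p.1 [] (fun l => l ++ [p.2])) d := by
  induction schemas generalizing d with
  | nil => rfl
  | cons s rest ih =>
    simp only [List.foldl_cons, pvPairs, List.filterMap_cons]
    cases h : (PySem.Dict.mk s).get? "id" with
    | none => simpa [pvPairs] using ih _
    | some i => simp [aStep_eq, pvPairs] at ih ⊢; rw [ih]

theorem map_fst_pvPairs (schemas : List (List (String × String))) :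
    (pvPairs schemas).map Prod.fst = schemas.filterMap (fun s => (PySem.Dict.mk s).get? "id") := by
  simp [pvPairs, List.map_filterMap, Option.map_map, Function.comp_def]

theorem filter_pvPairs (schemas : List (List (String × String))) (i : String) :
    ((pvPairs schemas).filter (fun p => p.1 == i)).map Prod.snd
      = schemas.filter (fun s => (PySem.Dict.mk s).get? "id" == some i) := by
  induction schemas with
  | nil => rfl
  | cons s rest ih =>
    simp only [pvPairs, List.filterMap_cons] at *
    cases h : (PySem.Dict.mk s).get? "id" with
    | none => simp [h, ih]
    | some j =>
      by_cases hji : j = i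
      · subst hji; simp [h, ih]
      · simp [h, hji, ih]

-- ===== VERDICT (by name: the statement is the Claim_ definition above) =====
theorem id_to_schema_spec : Claim_equal_id_to_schema := by
  intro schemas _
  unfold Spec_id_to_schema id_to_schema id_to_schema_alt
  rw [foldA_eq]
  set F := fun (d : PySem.Dict String (List (List (String × String)))) (p : String × List (String × String)) => d.modify p.1 [] (fun l => l ++ [p.2]) with hF
  have hnd : ((pvPairs schemas).foldl F PySem.Dict.empty).keys.Nodup := by
    simpa [hF] using PySem.Dict.nodup_keys_foldl_modify_key (pvPairs schemas) Prod.fst []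
      (fun d p => fun l => l ++ [p.2]) PySem.Dict.empty (by simp)
  rw [PySem.Dict.items_eq_map_keys _ hnd []]
  have hkeys : ((pvPairs schemas).foldl F PySem.Dict.empty).keys
      = PySem.Set.ofList ((pvPairs schemas).map Prod.fst) := by
    simpa [hF, PySem.Set.update, PySem.Set.ofList, PySem.Dict.keys_empty] using
      PySem.Dict.keys_foldl_modify_key (pvPairs schemas) Prod.fst []
        (fun d p => fun l => l ++ [p.2]) PySem.Dict.empty
  rw [hkeys, map_fst_pvPairs]
  simp only [PySem.List.dedup_eq_ofList]
  apply List.map_congr_left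
  intro i _
  have := PySem.Dict.getD_foldl_modify_append (pvPairs schemas)
      (PySem.Dict.empty : PySem.Dict String (List (List (String × String)))) i
  simp only [PySem.Dict.getD_empty, List.nil_append] at this
  simp [hF, this, filter_pvPairs]
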